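-- pv_equiv track=rewrite | github.com/Convex-analysis/FedML_copy | python/fedml/simulation/sp/multi_hierarchical_FL/cloud.py | generate_array_with_constant_sum
-- ===== SOURCE A (Python) =====
-- def generate_array_with_constant_sum(n, total_sum):
--     # initialize array with all 1's
--     arr = [1] * n
--     remaining_sum = total_sum - n  # subtract n since we have n elements already
--
--     # distribute remaining sum randomly
--     i = 0
--     while remaining_sum > 0:
--         arr[i] += 1
--         remaining_sum -= 1
--         i = (i + 1) % n
--
--     return arr
-- ===== SOURCE B (Python) =====
-- def generate_array_with_constant_sum(n, total_sum):
--     # Closed form: each slot starts at 1; the remaining sum is spread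
--     # round-robin from index 0, so the first (remaining % n) slots get one extra.
--     if n <= 0:
--         return []
--     remaining = max(total_sum - n, 0)
--     base, extra = divmod(remaining, n)
--     return [1 + base + 1] * extra + [1 + base] * (n - extra)
-- ===== Notes on version B (the rewrite author's own statement) =====
-- stated objective: simpler
-- what changed: Replaces the one-unit-at-a-time round-robin while loop with a closed-form divmod: every slot gets 1 + remaining//n and the first remaining%n slots get one extra.
-- crash fix: On n <= 0 with total_sum > n, A raises IndexError (the loop indexes into the empty list); B returns []. — e.g. on generate_array_with_constant_sum(0, 1): A raises IndexError, B returns []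
import Mathlib
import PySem

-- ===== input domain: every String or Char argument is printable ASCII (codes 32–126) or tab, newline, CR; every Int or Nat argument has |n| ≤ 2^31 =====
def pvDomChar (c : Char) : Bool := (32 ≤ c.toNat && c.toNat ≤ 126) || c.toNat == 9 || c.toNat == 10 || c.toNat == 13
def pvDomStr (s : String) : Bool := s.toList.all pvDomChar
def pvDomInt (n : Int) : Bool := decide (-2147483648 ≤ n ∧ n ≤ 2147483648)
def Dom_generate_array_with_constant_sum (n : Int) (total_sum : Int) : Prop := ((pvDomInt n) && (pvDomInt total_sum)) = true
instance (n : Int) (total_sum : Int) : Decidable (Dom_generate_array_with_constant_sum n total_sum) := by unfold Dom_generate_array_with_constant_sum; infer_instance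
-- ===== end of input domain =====

-- B replaces A's one-unit-at-a-time round-robin distribution loop with a closed-form divmod.

-- ===== PORT A =====
-- the while loop: fuel is remaining_sum.toNat (remaining_sum drops by exactly 1 per iteration,
-- and the loop runs while remaining_sum > 0); arr[i] += 1 via getD/set (i is in range on Pre_)
def pvLoopA (n : Int) : Nat → Int → List Int → List Int
  | 0, _, arr => arr
  | k + 1, i, arr => pvLoopA n k (PySem.Int.mod (i + 1) n) (arr.set i.toNat (arr.getD i.toNat 0 + 1))

def generate_array_with_constant_sum (n : Int) (total_sum : Int) : List Int :=
  -- arr = [1] * n; remaining_sum = total_sum - n; then the while loop from i = 0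
  pvLoopA n (total_sum - n).toNat 0 (List.replicate n.toNat 1)

-- ===== PORT B =====
def generate_array_with_constant_sum_alt (n : Int) (total_sum : Int) : List Int :=
  if n ≤ 0 then []
  else
    -- remaining = max(total_sum - n, 0); base, extra = divmod(remaining, n)
    List.replicate (PySem.Int.mod (max (total_sum - n) 0) n).toNat
        (1 + PySem.Int.floordiv (max (total_sum - n) 0) n + 1) ++
      List.replicate (n.toNat - (PySem.Int.mod (max (total_sum - n) 0) n).toNat)
        (1 + PySem.Int.floordiv (max (total_sum - n) 0) n)

-- ===== PRECONDITION & SPEC =====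
-- Pre_ excludes exactly the inputs where A raises IndexError: n ≤ 0 (arr is empty) while total_sum - n > 0 keeps the loop running.
def Pre_generate_array_with_constant_sum (n : Int) (total_sum : Int) : Prop := 0 < n ∨ total_sum ≤ n
instance (n : Int) (total_sum : Int) : Decidable (Pre_generate_array_with_constant_sum n total_sum) := by unfold Pre_generate_array_with_constant_sum; infer_instance
def pvWitness_generate_array_with_constant_sum : Int × Int := (3, 11)

-- On n ≤ 0 with total_sum > n, A raises IndexError (the loop indexes into an empty list); B returns [].
def Raises_generate_array_with_constant_sum (n : Int) (total_sum : Int) : Prop := n ≤ 0 ∧ n < total_sum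
instance (n : Int) (total_sum : Int) : Decidable (Raises_generate_array_with_constant_sum n total_sum) := by unfold Raises_generate_array_with_constant_sum; infer_instance
def pvRaiseWitness_generate_array_with_constant_sum : Int × Int := (0, 1)
def pvRaiseWitnessOut_generate_array_with_constant_sum : List Int := []

def Spec_generate_array_with_constant_sum (n : Int) (total_sum : Int) (out : List Int) : Prop := out = generate_array_with_constant_sum_alt n total_sum
instance (n : Int) (total_sum : Int) (out : List Int) : Decidable (Spec_generate_array_with_constant_sum n total_sum out) := by unfold Spec_generate_array_with_constant_sum; infer_instance

-- ===== CLAIM (what is proved, stated in full; the proofs are below) =====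
def Claim_equal_generate_array_with_constant_sum : Prop := ∀ (n : Int) (total_sum : Int), Dom_generate_array_with_constant_sum n total_sum → Pre_generate_array_with_constant_sum n total_sum → Spec_generate_array_with_constant_sum n total_sum (generate_array_with_constant_sum n total_sum)
def Claim_raises_generate_array_with_constant_sum : Prop := (∀ (n : Int) (total_sum : Int), Dom_generate_array_with_constant_sum n total_sum → Raises_generate_array_with_constant_sum n total_sum → ¬ Pre_generate_array_with_constant_sum n total_sum) ∧ (Dom_generate_array_with_constant_sum (pvRaiseWitness_generate_array_with_constant_sum.1) (pvRaiseWitness_generate_array_with_constant_sum.2) ∧ Raises_generate_array_with_constant_sum (pvRaiseWitness_generate_array_with_constant_sum.1) (pvRaiseWitness_generate_array_with_constant_sum.2) ∧ generate_array_with_constant_sum_alt (pvRaiseWitness_generate_array_with_constant_sum.1) (pvRaiseWitness_generate_array_with_constant_sum.2) = pvRaiseWitnessOut_generate_array_with_constant_sum)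

-- ===== LEMMAS AND PROOFS =====

-- helper: a % n for a < 2n
theorem pv_mod_small (a m : Nat) (h1 : a < 2 * m) : a % m = if a < m then a else a - m := by
  split_ifs with h
  · exact Nat.mod_eq_of_lt h
  · have h3 : a = m + (a - m) := by omega
    calc a % m = (m + (a - m)) % m := by rw [← h3]
      _ = (a - m) % m := Nat.add_mod_left _ _
      _ = a - m := Nat.mod_eq_of_lt (by omega)

theorem pvLoopA_length (n : Int) (k : Nat) : ∀ (i : Int) (arr : List Int),
    (pvLoopA n k i arr).length = arr.length := by
  induction k with
  | zero => intro i arr; rfl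
  | succ k ih => intro i arr; simp [pvLoopA, ih]

-- the key invariant: after k steps starting at index ii, slot j has gained
-- (k + m - 1 - ((j + m - ii) % m)) / m, where m = n.toNat
theorem pvLoopA_getD (m : Nat) (hm : 0 < m) : ∀ (k : Nat) (ii : Nat) (_ : ii < m)
    (arr : List Int) (_ : arr.length = m) (j : Nat) (_ : j < m),
    (pvLoopA (m : Int) k (ii : Int) arr).getD j 0
      = arr.getD j 0 + ((k + m - 1 - ((j + m - ii) % m)) / m : Nat) := by
  intro k
  induction k with
  | zero =>
    intro ii hi arr hlen j hj
    have hd : (j + m - ii) % m < m := Nat.mod_lt _ hm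
    rw [Nat.div_eq_of_lt (by omega)]
    simp [pvLoopA]
  | succ k ih =>
    intro ii hi arr hlen j hj
    have hmod : PySem.Int.mod ((ii : Int) + 1) (m : Int)
        = (((ii + 1) % m : Nat) : Int) := by
      have := PySem.Int.mod_natCast (ii + 1) m
      simpa using this
    have htoNat : ((ii : Int)).toNat = ii := Int.toNat_natCast ii
    have hlen' : (arr.set ii (arr.getD ii 0 + 1)).length = m := by simp [hlen]
    have hstep : pvLoopA (m : Int) (k + 1) (ii : Int) arr
        = pvLoopA (m : Int) k (((ii + 1) % m : Nat) : Int)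
            (arr.set ii (arr.getD ii 0 + 1)) := by
      simp [pvLoopA, hmod, htoNat]
    rw [hstep, ih ((ii + 1) % m) (Nat.mod_lt _ hm) _ hlen' j hj]
    set d := (j + m - ii) % m with hd_def
    have hdlt : d < m := Nat.mod_lt _ hm
    have hd_cases : (j < ii ∧ d = j + m - ii) ∨ (ii ≤ j ∧ d = j - ii) := by
      have h := hd_def
      rw [pv_mod_small _ _ (by omega)] at h
      rcases Nat.lt_or_ge j ii with hlt | hge
      · left; refine ⟨hlt, ?_⟩; rw [h, if_pos (by omega)]
      · right; refine ⟨hge, ?_⟩; rw [h, if_neg (by omega)]; omega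
    have hset : ∀ (v : Int), (arr.set ii v).getD j 0
        = if j = ii then v else arr.getD j 0 := by
      intro v
      split_ifs with h
      · subst h
        rw [List.getD_eq_getElem _ _ (by simp [hlen]; omega)]
        exact List.getElem_set_self _
      · rw [List.getD_eq_getElem _ _ (by simp [hlen]; omega),
            List.getD_eq_getElem _ _ (by omega)]
        exact List.getElem_set_ne (by omega) _
    have hget := hset (arr.getD ii 0 + 1)
    by_cases hji : j = ii
    · -- hit: d = 0, new distance is m - 1
      subst hji
      have hd0 : d = 0 := by omega
      have hd' : (j + m - (j + 1) % m) % m = m - 1 := by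
        rcases Nat.lt_or_ge (j + 1) m with h | h
        · rw [Nat.mod_eq_of_lt h, pv_mod_small _ _ (by omega)]
          split_ifs <;> omega
        · have hj1 : j + 1 = m := by omega
          rw [hj1, Nat.mod_self, pv_mod_small _ _ (by omega)]
          split_ifs <;> omega
      rw [hget, if_pos rfl, hd', hd0]
      have h1 : k + 1 + m - 1 - 0 = k + m := by omega
      have h2 : k + m - 1 - (m - 1) = k := by omega
      rw [h1, h2, Nat.add_div_right k hm]
      push_cast; ring
    · -- miss: d ≥ 1, new distance is d - 1
      have hd1 : 1 ≤ d := by omega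
      have hd' : (j + m - (ii + 1) % m) % m = d - 1 := by
        rcases Nat.lt_or_ge (ii + 1) m with h | h
        · rw [Nat.mod_eq_of_lt h, pv_mod_small _ _ (by omega)]
          split_ifs <;> omega
        · have hi1 : ii + 1 = m := by omega
          rw [hi1, Nat.mod_self, Nat.sub_zero, pv_mod_small _ _ (by omega)]
          split_ifs <;> omega
      rw [hget, if_neg hji, hd']
      have : k + 1 + m - 1 - d = k + m - 1 - (d - 1) := by omega
      rw [this]

-- (k + m - 1 - j)/m = k/m + (1 if j < k % m else 0), for j < m
theorem pv_div_formula (m k j : Nat) (hm : 0 < m) (hj : j < m) :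
    (k + m - 1 - j) / m = k / m + (if j < k % m then 1 else 0) := by
  have hdm := Nat.div_add_mod k m
  set q := k / m with hq
  set r := k % m with hr
  have hrlt : r < m := Nat.mod_lt _ hm
  split_ifs with h
  · have e1 : k + m - 1 - j = m * q + (r - 1 - j + m) := by omega
    rw [e1, Nat.mul_add_div hm, Nat.add_div_right _ hm, Nat.div_eq_of_lt (by omega)]
  · have e1 : k + m - 1 - j = m * q + (r + m - 1 - j) := by omega
    rw [e1, Nat.mul_add_div hm, Nat.div_eq_of_lt (by omega)]

theorem generate_array_with_constant_sum_spec : Claim_equal_generate_array_with_constant_sum := by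
  intro n total_sum _ hpre
  unfold Spec_generate_array_with_constant_sum
  unfold generate_array_with_constant_sum generate_array_with_constant_sum_alt
  by_cases hn : n ≤ 0
  · -- loop has fuel 0 (total_sum ≤ n from Pre_), both sides are []
    rcases hpre with h | h
    · omega
    · have h1 : (total_sum - n).toNat = 0 := by omega
      have h2 : n.toNat = 0 := by omega
      simp [h1, h2, pvLoopA, hn]
  · rw [Int.not_le] at hn
    set m := n.toNat with hmdef
    have hm : 0 < m := by omega
    have hn' : n = (m : Int) := by omega
    set k := (total_sum - n).toNat with hkdef
    have hmax : max (total_sum - n) 0 = (k : Int) := by omega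
    rw [if_neg (by omega), hmax, hn']
    rw [PySem.Int.floordiv_natCast, PySem.Int.mod_natCast]
    have hlenA : (pvLoopA (m : Int) k (0 : Int) (List.replicate m 1)).length = m := by
      rw [show ((0 : Int)) = ((0 : Nat) : Int) from rfl]
      rw [pvLoopA_length]; simp
    have hrm : k % m < m := Nat.mod_lt _ hm
    apply List.ext_getElem
    · rw [hlenA]; simp; omega
    · intro j hj1 hj2
      have hjm : j < m := by rwa [hlenA] at hj1
      have hA : (pvLoopA (m : Int) k ((0 : Nat) : Int) (List.replicate m 1)).getD j 0
          = (List.replicate m (1 : Int)).getD j 0 + ((k + m - 1 - ((j + m - 0) % m)) / m : Nat) :=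
        pvLoopA_getD m hm k 0 hm (List.replicate m 1) (by simp) j hjm
      have hmod : (j + m - 0) % m = j := by
        rw [Nat.sub_zero, pv_mod_small _ _ (by omega)]; split_ifs <;> omega
      rw [hmod] at hA
      simp only [Nat.cast_zero] at hA
      have e1 : (pvLoopA (m : Int) k (0 : Int) (List.replicate m 1))[j]
          = (pvLoopA (m : Int) k (0 : Int) (List.replicate m 1)).getD j 0 :=
        (List.getD_eq_getElem _ _ hj1).symm
      have hrepl : (List.replicate m (1 : Int)).getD j 0 = 1 := by
        rw [List.getD_eq_getElem _ _ (by simpa using hjm)]; simp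
      rw [e1, hA, hrepl, pv_div_formula m k j hm hjm]
      -- RHS: element of the append of two replicates
      rw [List.getElem_append]
      simp only [Int.toNat_natCast, List.length_replicate]
      split_ifs with h1
      · rw [List.getElem_replicate]; push_cast; ring
      · rw [List.getElem_replicate]; push_cast; omega

@[simp] theorem generate_array_with_constant_sum_raises : Claim_raises_generate_array_with_constant_sum := by
  unfold Claim_raises_generate_array_with_constant_sum
  constructor
  · intro n total_sum _ hr hpre
    unfold Raises_generate_array_with_constant_sum at hr
    unfold Pre_generate_array_with_constant_sum at hpre
    omega
  · exact ⟨by decide, by decide, by decide⟩
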